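-- pv_equiv track=rewrite | github.com/nooshindev/my-python-project | as-strip.py | my_strip
-- ===== SOURCE A (Python) =====
-- def my_strip(s: str) -> str:
--     start = 0
--     end = len(s) - 1
--
--     while start <= end and s[start] == " ":
--         start += 1
--     while end >= start and s[end] == " ":
--         end -= 1
--
--     return s[start:end + 1]
-- ===== SOURCE B (Python) =====
-- def my_strip(s: str) -> str:
--     def drop_leading(chars):
--         while chars and chars[0] == " ":
--             chars = chars[1:]
--         return chars
--
--     forward = drop_leading(list(s))
--     trimmed = drop_leading(forward[::-1])
--     return "".join(trimmed[::-1])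
-- ===== Notes on version B (the rewrite author's own statement) =====
-- stated objective: alternative
-- what changed: Replaces A's two-pointer index scan with its slice at the end by a single drop-leading-spaces helper applied twice around a reversal (drop, reverse, drop, reverse), eliminating all index arithmetic.
import Mathlib
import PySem

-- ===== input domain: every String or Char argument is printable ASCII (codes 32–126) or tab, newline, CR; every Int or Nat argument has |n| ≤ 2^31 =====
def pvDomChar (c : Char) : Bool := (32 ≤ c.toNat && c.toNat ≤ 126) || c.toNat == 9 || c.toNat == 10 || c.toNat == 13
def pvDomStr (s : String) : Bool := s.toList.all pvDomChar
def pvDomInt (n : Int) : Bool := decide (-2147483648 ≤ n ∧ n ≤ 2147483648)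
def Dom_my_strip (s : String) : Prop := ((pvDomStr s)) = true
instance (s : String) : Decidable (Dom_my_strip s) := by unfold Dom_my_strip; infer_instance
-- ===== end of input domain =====

-- B replaces A's two-pointer index scan with drop-leading-spaces / reverse / drop-leading-spaces /
-- reverse (objective: alternative — no index arithmetic; same cost).

-- ===== PORT A =====
-- 'while start <= end and s[start] == " ": start += 1'
-- (fuel = cs.length only totalizes the loop: it is never exhausted before the loop condition fails)
def pvFindStart (cs : List Char) (fuel : Nat) (start e : Int) : Int :=
  match fuel with
  | 0 => start
  | Nat.succ f =>
    if start ≤ e ∧ PySem.List.pyGet? cs start = some ' ' then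
      pvFindStart cs f (start + 1) e
    else start

-- 'while end >= start and s[end] == " ": end -= 1'
def pvFindEnd (cs : List Char) (fuel : Nat) (start e : Int) : Int :=
  match fuel with
  | 0 => e
  | Nat.succ f =>
    if e ≥ start ∧ PySem.List.pyGet? cs e = some ' ' then
      pvFindEnd cs f start (e - 1)
    else e

def my_strip (s : String) : String :=
  let cs := s.toList
  let start := pvFindStart cs cs.length 0 ((cs.length : Int) - 1)
  let e := pvFindEnd cs cs.length start ((cs.length : Int) - 1)
  String.mk (PySem.List.slice cs (some start) (some (e + 1)))

-- ===== PORT B =====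
-- 'while chars and chars[0] == " ": chars = chars[1:]'
def pvDropLeading (cs : List Char) : List Char :=
  match cs with
  | [] => []
  | c :: rest => if c = ' ' then pvDropLeading rest else c :: rest

def my_strip_alt (s : String) : String :=
  let forward := pvDropLeading s.toList
  let trimmed := pvDropLeading forward.reverse
  String.mk trimmed.reverse

-- ===== PRECONDITION & SPEC =====
def Spec_my_strip (s : String) (out : String) : Prop := out = my_strip_alt s
instance (s : String) (out : String) : Decidable (Spec_my_strip s out) := by unfold Spec_my_strip; infer_instance

-- ===== CLAIM (what is proved, stated in full; the proofs are below) =====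
def Claim_equal_my_strip : Prop := ∀ (s : String), Dom_my_strip s → Spec_my_strip s (my_strip s)

-- ===== LEMMAS AND PROOFS =====

lemma pvDropLeading_eq (cs : List Char) : pvDropLeading cs = cs.dropWhile (· == ' ') := by
  induction cs with
  | nil => rfl
  | cons c rest ih =>
    simp only [pvDropLeading, List.dropWhile_cons]
    by_cases h : c = ' ' <;> simp [h, ih]

lemma drop_length_takeWhile (p : Char → Bool) (l : List Char) :
    l.drop (l.takeWhile p).length = l.dropWhile p := by
  induction l with
  | nil => rfl
  | cons c rest ih =>
    simp only [List.takeWhile_cons, List.dropWhile_cons]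
    by_cases h : p c <;> simp [h, ih]

lemma pvFindStart_spec (cs : List Char) :
    ∀ (d st : Nat), cs.length ≤ st + d →
      pvFindStart cs d (st : Int) ((cs.length : Int) - 1)
        = (st : Int) + (((cs.drop st).takeWhile (· == ' ')).length : Int) := by
  intro d
  induction d with
  | zero =>
    intro st h
    have hd : cs.drop st = [] := List.drop_eq_nil_of_le (by omega)
    simp [pvFindStart, hd]
  | succ d ih =>
    intro st h
    rw [pvFindStart]
    by_cases hlt : st < cs.length
    · have hget : PySem.List.pyGet? cs (st : Int) = some cs[st] :=
        PySem.List.pyGet?_ofNat cs st hlt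
      have hdrop : cs.drop st = cs[st] :: cs.drop (st + 1) := List.drop_eq_getElem_cons hlt
      by_cases hsp : cs[st] = ' '
      · rw [if_pos ⟨by omega, by rw [hget, hsp]⟩]
        rw [show ((st : Int) + 1) = ((st + 1 : Nat) : Int) by push_cast; ring,
          ih (st + 1) (by omega), hdrop]
        simp [hsp]
        omega
      · rw [if_neg (by rintro ⟨-, hg⟩; rw [hget] at hg; exact hsp (Option.some.inj hg))]
        rw [hdrop]
        simp [hsp]
    · rw [if_neg (by rintro ⟨hle, -⟩; omega)]
      have hd : cs.drop st = [] := List.drop_eq_nil_of_le (by omega)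
      simp [hd]

lemma pvFindEnd_spec (cs : List Char) (st : Nat) :
    ∀ (e : Nat) (fuel : Nat), e - st ≤ fuel → st ≤ e → e ≤ cs.length →
      pvFindEnd cs fuel (st : Int) ((e : Int) - 1)
        = (st : Int) + ((((cs.take e).drop st).reverse.dropWhile (· == ' ')).length : Int) - 1 := by
  intro e
  induction e with
  | zero =>
    intro fuel hf h1 h2
    cases fuel with
    | zero => simp [pvFindEnd]; omega
    | succ f =>
      rw [pvFindEnd]
      rw [if_neg (by rintro ⟨hle, -⟩; omega)]
      simp
      omega
  | succ e ih =>
    intro fuel hf h1 h2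
    rw [show (((e + 1 : Nat) : Int) - 1) = (e : Int) by push_cast; ring]
    have helt : e < cs.length := by omega
    have hget : PySem.List.pyGet? cs (e : Int) = some cs[e] :=
      PySem.List.pyGet?_ofNat cs e helt
    by_cases hst : st = e + 1
    · subst hst
      cases fuel with
      | zero => simp [pvFindEnd]
      | succ f =>
        rw [pvFindEnd]
        rw [if_neg (by rintro ⟨hle, -⟩; omega)]
        simp
    · have hste : st ≤ e := by omega
      obtain ⟨f, rfl⟩ : ∃ f, fuel = f + 1 := ⟨fuel - 1, by omega⟩
      rw [pvFindEnd]
      have hseg : (cs.take (e + 1)).drop st = (cs.take e).drop st ++ [cs[e]] := by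
        rw [List.take_succ_eq_append_getElem helt,
          List.drop_append_of_le_length (by simp [List.length_take]; omega)]
      by_cases hsp : cs[e] = ' '
      · rw [if_pos ⟨by omega, by rw [hget, hsp]⟩]
        rw [ih f (by omega) hste (by omega), hseg]
        simp [hsp]
      · rw [if_neg (by rintro ⟨-, hg⟩; rw [hget] at hg; exact hsp (Option.some.inj hg))]
        rw [hseg]
        have hlen : ((cs.take e).drop st).length = e - st := by
          simp [List.length_take, List.length_drop]; omega
        simp [hsp, hlen]
        omega

lemma reverse_dropWhile_reverse (p : Char → Bool) (l : List Char) :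
    (l.reverse.dropWhile p).reverse = l.take (l.length - (l.reverse.takeWhile p).length) := by
  rw [← drop_length_takeWhile p l.reverse, List.drop_reverse, List.reverse_reverse]

-- ===== VERDICT (by name: the statement is the Claim_ definition above) =====
theorem my_strip_spec : Claim_equal_my_strip := by
  unfold Claim_equal_my_strip Spec_my_strip
  intro s _
  simp only [my_strip, my_strip_alt]
  rw [pvDropLeading_eq, pvDropLeading_eq]
  obtain ⟨cs, hcs⟩ : ∃ cs, s.toList = cs := ⟨_, rfl⟩
  rw [hcs]
  obtain ⟨k, hk⟩ : ∃ k, (cs.takeWhile (· == ' ')).length = k := ⟨_, rfl⟩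
  have hk_le : k ≤ cs.length := by rw [← hk]; exact (List.takeWhile_prefix _).length_le
  have hstart : pvFindStart cs cs.length 0 ((cs.length : Int) - 1) = (k : Int) := by
    have h0 := pvFindStart_spec cs cs.length 0 (by omega)
    simpa [hk] using h0
  obtain ⟨ds, hds⟩ : ∃ ds, cs.dropWhile (· == ' ') = ds := ⟨_, rfl⟩
  have hds_drop : cs.drop k = ds := by rw [← hk, ← hds, drop_length_takeWhile]
  obtain ⟨L, hL⟩ : ∃ L, (ds.reverse.dropWhile (· == ' ')).length = L := ⟨_, rfl⟩
  have hend : pvFindEnd cs cs.length (k : Int) ((cs.length : Int) - 1) = (k : Int) + (L : Int) - 1 := by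
    have h1 := pvFindEnd_spec cs k cs.length cs.length (by omega) hk_le (le_refl _)
    rw [List.take_length, hds_drop, hL] at h1
    exact h1
  rw [hstart, hend]
  rw [show ((k : Int) + (L : Int) - 1 + 1) = ((k + L : Nat) : Int) by push_cast; ring]
  rw [PySem.List.slice_natCast, show k + L - k = L by omega, hds_drop, hds]
  congr 1
  rw [reverse_dropWhile_reverse]
  have hLval : L = ds.length - (ds.reverse.takeWhile (· == ' ')).length := by
    rw [← hL, ← drop_length_takeWhile (· == ' ') ds.reverse]
    simp
  rw [hLval]
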